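-- pv_equiv track=rewrite | github.com/Bdelas777/Python-Practice | arraysAndhashing/ExclusiveElements.py | exclusive_products
-- ===== SOURCE A (Python) =====
-- def exclusive_products(inventory1, inventory2):
--     set1 = {item.lower() for item in inventory1}
--     set2 = {item.lower() for item in inventory2}
--
--     exclusive1 = set1 - set2
--     exclusive2 = set2 - set1
--
--     result1 = sorted({item.upper() for item in inventory1 if item.lower() in exclusive1})
--     result2 = sorted({item.upper() for item in inventory2 if item.lower() in exclusive2})
--
--     return (result1, result2)
-- ===== SOURCE B (Python) =====
-- def _push(acc, k):
--     # append k unless it is already the last element (duplicates are adjacent in sorted input)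
--     if not acc or acc[-1] != k:
--         acc.append(k)
--
--
-- def exclusive_products(inventory1, inventory2):
--     keys1 = sorted(item.lower() for item in inventory1)
--     keys2 = sorted(item.lower() for item in inventory2)
--
--     ex1, ex2 = [], []
--     i, j = 0, 0
--     n1, n2 = len(keys1), len(keys2)
--     while i < n1 and j < n2:
--         a, b = keys1[i], keys2[j]
--         if a < b:
--             _push(ex1, a)
--             i += 1
--         elif b < a:
--             _push(ex2, b)
--             j += 1
--         else:
--             while i < n1 and keys1[i] == a:
--                 i += 1
--             while j < n2 and keys2[j] == a:
--                 j += 1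
--     while i < n1:
--         _push(ex1, keys1[i])
--         i += 1
--     while j < n2:
--         _push(ex2, keys2[j])
--         j += 1
--
--     result1 = sorted(k.upper() for k in ex1)
--     result2 = sorted(k.upper() for k in ex2)
--     return (result1, result2)
-- ===== Notes on version B (the rewrite author's own statement) =====
-- stated objective: alternative
-- what changed: Replaces A's hash-set construction, set differences and second filtering scans over the original lists by sorting the two lowercased key lists and running a two-pointer merge that emits (deduplicated) keys exclusive to each side, using that on ASCII input item.upper() equals item.lower().upper() so the originals never need rescanning.
import Mathlib
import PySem

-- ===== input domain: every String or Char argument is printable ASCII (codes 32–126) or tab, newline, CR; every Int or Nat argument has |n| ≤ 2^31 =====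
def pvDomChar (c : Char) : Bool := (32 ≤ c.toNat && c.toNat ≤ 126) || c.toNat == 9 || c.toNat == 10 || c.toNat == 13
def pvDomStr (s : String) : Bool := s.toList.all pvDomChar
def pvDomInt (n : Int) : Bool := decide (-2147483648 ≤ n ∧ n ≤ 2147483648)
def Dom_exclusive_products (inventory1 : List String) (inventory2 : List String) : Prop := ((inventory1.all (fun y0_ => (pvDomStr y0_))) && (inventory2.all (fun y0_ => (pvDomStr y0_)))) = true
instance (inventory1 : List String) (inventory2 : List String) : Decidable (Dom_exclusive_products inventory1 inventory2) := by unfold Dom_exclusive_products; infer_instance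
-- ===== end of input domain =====

-- B replaces A's hash-set differences and second filtering scans by sorting the two lowercased
-- key lists and a two-pointer merge emitting the keys exclusive to each side (objective: alternative).

-- ===== PORT A =====
def exclusive_products (inventory1 : List String) (inventory2 : List String) : List String × List String :=
  let set1 : PySem.Set String := PySem.Set.ofList (inventory1.map PySem.Str.lower)
  let set2 : PySem.Set String := PySem.Set.ofList (inventory2.map PySem.Str.lower)
  let exclusive1 := PySem.Set.diff set1 set2
  let exclusive2 := PySem.Set.diff set2 set1
  let result1 := PySem.List.sorted (PySem.Set.ofList ((inventory1.filter (fun item => PySem.Set.contains exclusive1 (PySem.Str.lower item))).map PySem.Str.upper)) (fun x => x) false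
  let result2 := PySem.List.sorted (PySem.Set.ofList ((inventory2.filter (fun item => PySem.Set.contains exclusive2 (PySem.Str.lower item))).map PySem.Str.upper)) (fun x => x) false
  (result1, result2)

-- ===== PORT B =====
-- _push(acc, k): append k unless it is already the last element
def pvPush (acc : List String) (k : String) : List String :=
  if acc = [] ∨ acc.getLast? ≠ some k then acc ++ [k] else acc

-- the two-pointer merge over the two sorted key lists (B's main while-loop; the two
-- trailing while-loops are the base cases, the inner duplicate-skipping loops are dropWhile)
def pvMerge : List String → List String → List String → List String → List String × List String
  | [], l2, e1, e2 => (e1, l2.foldl pvPush e2)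
  | a :: t1, [], e1, e2 => ((a :: t1).foldl pvPush e1, e2)
  | a :: t1, b :: t2, e1, e2 =>
    if a < b then pvMerge t1 (b :: t2) (pvPush e1 a) e2
    else if b < a then pvMerge (a :: t1) t2 e1 (pvPush e2 b)
    else pvMerge ((a :: t1).dropWhile (fun x => x == a)) ((b :: t2).dropWhile (fun x => x == a)) e1 e2
  termination_by l1 l2 _ _ => l1.length + l2.length
  decreasing_by
  · simp
  · simp
  · rename_i hab hba
    have hb : b = a := le_antisymm (not_lt.mp hab) (not_lt.mp hba)
    subst hb
    simp only [List.dropWhile_cons, beq_self_eq_true, if_true]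
    have h1 := List.length_dropWhile_le (fun x => x == b) t1
    have h2 := List.length_dropWhile_le (fun x => x == b) t2
    simp only [List.length_cons]
    omega

def exclusive_products_alt (inventory1 : List String) (inventory2 : List String) : List String × List String :=
  let keys1 := PySem.List.sorted (inventory1.map PySem.Str.lower) (fun x => x) false
  let keys2 := PySem.List.sorted (inventory2.map PySem.Str.lower) (fun x => x) false
  let ex := pvMerge keys1 keys2 [] []
  let result1 := PySem.List.sorted (ex.1.map PySem.Str.upper) (fun x => x) false
  let result2 := PySem.List.sorted (ex.2.map PySem.Str.upper) (fun x => x) false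
  (result1, result2)

-- ===== PRECONDITION & SPEC =====
def Spec_exclusive_products (inventory1 : List String) (inventory2 : List String) (out : List String × List String) : Prop := out = exclusive_products_alt inventory1 inventory2
instance (inventory1 : List String) (inventory2 : List String) (out : List String × List String) : Decidable (Spec_exclusive_products inventory1 inventory2 out) := by unfold Spec_exclusive_products; infer_instance

-- ===== CLAIM (what is proved, stated in full; the proofs are below) =====
def Claim_equal_exclusive_products : Prop := ∀ (inventory1 : List String) (inventory2 : List String), Dom_exclusive_products inventory1 inventory2 → Spec_exclusive_products inventory1 inventory2 (exclusive_products inventory1 inventory2)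

-- ===== LEMMAS AND PROOFS =====

theorem chLe (a c : Char) : (a ≤ c) ↔ a.toNat ≤ c.toNat := by
  rw [Char.le_def, UInt32.le_iff_toNat_le]; rfl

theorem chOf (n : Nat) (h : n < 55296) : (Char.ofNat n).toNat = n := by
  rw [Char.toNat_ofNat, if_pos (Or.inl h)]

-- ASCII case algebra (Python-exact: PySem's upper/lower only move the ASCII letter blocks)
theorem upperChar_lowerChar (c : Char) :
    PySem.Chars.upperChar (PySem.Chars.lowerChar c) = PySem.Chars.upperChar c := by
  simp only [PySem.Chars.lowerChar, PySem.Chars.upperChar, PySem.Chars.isupper, PySem.Chars.islower,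
    Bool.and_eq_true, decide_eq_true_eq, chLe]
  rw [show 'a'.toNat = 97 from rfl, show 'z'.toNat = 122 from rfl,
    show 'A'.toNat = 65 from rfl, show 'Z'.toNat = 90 from rfl]
  by_cases h1 : 65 ≤ c.toNat ∧ c.toNat ≤ 90
  · rw [if_pos h1, chOf (c.toNat + 32) (by omega), if_pos (by omega), if_neg (by omega),
      show c.toNat + 32 - 32 = c.toNat by omega, Char.ofNat_toNat]
  · rw [if_neg h1]

theorem lowerChar_upperChar (c : Char) :
    PySem.Chars.lowerChar (PySem.Chars.upperChar c) = PySem.Chars.lowerChar c := by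
  simp only [PySem.Chars.lowerChar, PySem.Chars.upperChar, PySem.Chars.isupper, PySem.Chars.islower,
    Bool.and_eq_true, decide_eq_true_eq, chLe]
  rw [show 'a'.toNat = 97 from rfl, show 'z'.toNat = 122 from rfl,
    show 'A'.toNat = 65 from rfl, show 'Z'.toNat = 90 from rfl]
  by_cases h1 : 97 ≤ c.toNat ∧ c.toNat ≤ 122
  · rw [if_pos h1, chOf (c.toNat - 32) (by omega), if_pos (by omega), if_neg (by omega),
      show c.toNat - 32 + 32 = c.toNat by omega, Char.ofNat_toNat]
  · rw [if_neg h1]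

theorem lowerChar_lowerChar (c : Char) :
    PySem.Chars.lowerChar (PySem.Chars.lowerChar c) = PySem.Chars.lowerChar c := by
  simp only [PySem.Chars.lowerChar, PySem.Chars.isupper, Bool.and_eq_true, decide_eq_true_eq, chLe]
  rw [show 'A'.toNat = 65 from rfl, show 'Z'.toNat = 90 from rfl]
  by_cases h1 : 65 ≤ c.toNat ∧ c.toNat ≤ 90
  · rw [if_pos h1, chOf (c.toNat + 32) (by omega), if_neg (by omega)]
  · rw [if_neg h1, if_neg h1]

theorem upper_lower (s : String) : PySem.Str.upper (PySem.Str.lower s) = PySem.Str.upper s := by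
  apply String.toList_injective
  simp only [PySem.Str.toList_upper, PySem.Str.toList_lower, PySem.Chars.upper, PySem.Chars.lower,
    List.map_map]
  exact List.map_congr_left (fun c _ => upperChar_lowerChar c)

theorem lower_upper (s : String) : PySem.Str.lower (PySem.Str.upper s) = PySem.Str.lower s := by
  apply String.toList_injective
  simp only [PySem.Str.toList_upper, PySem.Str.toList_lower, PySem.Chars.upper, PySem.Chars.lower,
    List.map_map]
  exact List.map_congr_left (fun c _ => lowerChar_upperChar c)

theorem lower_lower (s : String) : PySem.Str.lower (PySem.Str.lower s) = PySem.Str.lower s := by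
  apply String.toList_injective
  simp only [PySem.Str.toList_lower, PySem.Chars.lower, List.map_map]
  exact List.map_congr_left (fun c _ => lowerChar_lowerChar c)

-- pvPush as a set operation
theorem mem_pvPush (e : List String) (k x : String) : x ∈ pvPush e k ↔ x ∈ e ∨ x = k := by
  rw [pvPush]
  split_ifs with h
  · simp
  · push Not at h
    constructor
    · exact Or.inl
    · rintro (hx | rfl)
      · exact hx
      · exact List.mem_of_getLast? h.2

-- in a strictly increasing list the maximum is the last element
theorem last_of_max (e : List String) (x : String) (hp : e.Pairwise (· < ·)) (hx : x ∈ e)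
    (hmax : ∀ z ∈ e, z ≤ x) : e.getLast? = some x := by
  induction e with
  | nil => cases hx
  | cons h t ih =>
    cases t with
    | nil => simp_all
    | cons h2 t2 =>
      rw [List.getLast?_cons_cons]
      rcases List.mem_cons.1 hx with rfl | hxt
      · exact absurd (hmax h2 (by simp)) (not_le.2 ((List.pairwise_cons.1 hp).1 h2 (by simp)))
      · exact ih hp.tail hxt (fun z hz => hmax z (List.mem_cons_of_mem _ hz))

theorem pvPush_pairwise (e : List String) (k : String) (hp : e.Pairwise (· < ·))
    (hle : ∀ z ∈ e, z ≤ k) : (pvPush e k).Pairwise (· < ·) := by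
  rw [pvPush]
  split_ifs with h
  · rw [List.pairwise_append]
    refine ⟨hp, List.pairwise_singleton _ _, fun x hx y hy => ?_⟩
    rw [List.mem_singleton] at hy; subst hy
    rcases lt_or_eq_of_le (hle x hx) with hlt | rfl
    · exact hlt
    · rcases h with h | h
      · simp [h] at hx
      · exact absurd (last_of_max e x hp hx hle) h
  · exact hp

-- the trailing drain loop: push every remaining key
theorem pvFold_spec (l : List String) : ∀ (e : List String), l.Pairwise (· ≤ ·) →
    (∀ x ∈ e, ∀ y ∈ l, x ≤ y) → e.Pairwise (· < ·) →
    (l.foldl pvPush e).Pairwise (· < ·) ∧ ∀ x, (x ∈ l.foldl pvPush e ↔ x ∈ e ∨ x ∈ l) := by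
  induction l with
  | nil => intro e _ _ hp; exact ⟨hp, by simp⟩
  | cons k t ih =>
    intro e hl hle hp
    have hpush : ∀ x ∈ pvPush e k, ∀ y ∈ t, x ≤ y := by
      intro x hx y hy
      rcases (mem_pvPush e k x).1 hx with hx | rfl
      · exact hle x hx y (List.mem_cons_of_mem _ hy)
      · exact (List.pairwise_cons.1 hl).1 y hy
    obtain ⟨hp', hm⟩ := ih (pvPush e k) hl.tail hpush
      (pvPush_pairwise e k hp (fun z hz => hle z hz k (by simp)))
    refine ⟨hp', fun x => ?_⟩
    rw [List.foldl_cons, hm, mem_pvPush]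
    simp only [List.mem_cons]
    tauto

-- in a sorted list, after dropping the leading run of a, everything is > a
theorem dropWhile_gt (a : String) (l : List String) (hl : l.Pairwise (· ≤ ·))
    (hge : ∀ y ∈ l, a ≤ y) : ∀ x ∈ l.dropWhile (fun y => y == a), a < x := by
  induction l with
  | nil => simp
  | cons h t ih =>
    rw [List.dropWhile_cons]
    split_ifs with hh
    · simp only [beq_iff_eq] at hh; subst hh
      exact ih hl.tail (fun y hy => (List.pairwise_cons.1 hl).1 y hy)
    · simp only [beq_iff_eq] at hh
      intro x hx
      rcases List.mem_cons.1 hx with rfl | hxt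
      · exact lt_of_le_of_ne (hge x (by simp)) (fun e => hh e.symm)
      · exact lt_of_lt_of_le (lt_of_le_of_ne (hge h (by simp)) (fun e => hh e.symm))
          ((List.pairwise_cons.1 hl).1 x hxt)

-- full specification of the merge: strictly increasing outputs holding exactly the
-- one-sided keys (plus the accumulators)
theorem pvMerge_spec : ∀ (l1 l2 e1 e2 : List String), l1.Pairwise (· ≤ ·) → l2.Pairwise (· ≤ ·) →
    (∀ x ∈ e1, ∀ y ∈ l1, x ≤ y) → (∀ x ∈ e2, ∀ y ∈ l2, x ≤ y) →
    e1.Pairwise (· < ·) → e2.Pairwise (· < ·) →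
    ((pvMerge l1 l2 e1 e2).1.Pairwise (· < ·) ∧ (pvMerge l1 l2 e1 e2).2.Pairwise (· < ·)) ∧
    (∀ x, (x ∈ (pvMerge l1 l2 e1 e2).1 ↔ x ∈ e1 ∨ (x ∈ l1 ∧ x ∉ l2))) ∧
    (∀ x, (x ∈ (pvMerge l1 l2 e1 e2).2 ↔ x ∈ e2 ∨ (x ∈ l2 ∧ x ∉ l1))) := by
  intro l1 l2 e1 e2
  induction l1, l2, e1, e2 using pvMerge.induct with
  | case1 l2 e1 e2 =>
    intro _ hl2 _ hle2 hp1 hp2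
    obtain ⟨hfp, hfm⟩ := pvFold_spec l2 e2 hl2 hle2 hp2
    rw [show pvMerge [] l2 e1 e2 = (e1, l2.foldl pvPush e2) from by rw [pvMerge]]
    refine ⟨⟨hp1, hfp⟩, by simp, fun x => ?_⟩
    rw [hfm x]; simp
  | case2 a t1 e1 e2 =>
    intro hl1 _ hle1 _ hp1 hp2
    obtain ⟨hfp, hfm⟩ := pvFold_spec (a :: t1) e1 hl1 hle1 hp1
    rw [show pvMerge (a :: t1) [] e1 e2 = ((a :: t1).foldl pvPush e1, e2) from by rw [pvMerge]]
    refine ⟨⟨hfp, hp2⟩, fun x => ?_, by simp⟩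
    rw [hfm x]; simp
  | case3 a t1 b t2 e1 e2 hab ih =>
    intro hl1 hl2 hle1 hle2 hp1 hp2
    rw [show pvMerge (a :: t1) (b :: t2) e1 e2 = pvMerge t1 (b :: t2) (pvPush e1 a) e2 from by
      rw [pvMerge]; simp [hab]]
    have hanotl2 : a ∉ b :: t2 := by
      intro hm
      rcases List.mem_cons.1 hm with rfl | hm2
      · exact absurd hab (lt_irrefl a)
      · exact absurd (lt_of_lt_of_le hab ((List.pairwise_cons.1 hl2).1 a hm2)) (lt_irrefl a)
    have hle1' : ∀ x ∈ pvPush e1 a, ∀ y ∈ t1, x ≤ y := by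
      intro x hx y hy
      rcases (mem_pvPush e1 a x).1 hx with hx | rfl
      · exact hle1 x hx y (List.mem_cons_of_mem _ hy)
      · exact (List.pairwise_cons.1 hl1).1 y hy
    obtain ⟨hpair, hm1, hm2⟩ := ih hl1.tail hl2 hle1' hle2
      (pvPush_pairwise e1 a hp1 (fun z hz => hle1 z hz a (by simp))) hp2
    refine ⟨hpair, fun x => ?_, fun x => ?_⟩
    · rw [hm1 x, mem_pvPush]
      constructor
      · rintro ((hx | rfl) | ⟨hx, hnx⟩)
        · exact Or.inl hx
        · exact Or.inr ⟨by simp, hanotl2⟩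
        · exact Or.inr ⟨List.mem_cons_of_mem _ hx, hnx⟩
      · rintro (hx | ⟨hx, hnx⟩)
        · exact Or.inl (Or.inl hx)
        · rcases List.mem_cons.1 hx with rfl | hx2
          · exact Or.inl (Or.inr rfl)
          · exact Or.inr ⟨hx2, hnx⟩
    · rw [hm2 x]
      have hne : ∀ y ∈ b :: t2, y ≠ a := fun y hy h => hanotl2 (h ▸ hy)
      constructor
      · rintro (hx | ⟨hx, hnx⟩)
        · exact Or.inl hx
        · refine Or.inr ⟨hx, fun hm => ?_⟩
          rcases List.mem_cons.1 hm with rfl | hm2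
          · exact hne x hx rfl
          · exact hnx hm2
      · rintro (hx | ⟨hx, hnx⟩)
        · exact Or.inl hx
        · exact Or.inr ⟨hx, fun hm => hnx (List.mem_cons_of_mem _ hm)⟩
  | case4 a t1 b t2 e1 e2 hab hba ih =>
    intro hl1 hl2 hle1 hle2 hp1 hp2
    rw [show pvMerge (a :: t1) (b :: t2) e1 e2 = pvMerge (a :: t1) t2 e1 (pvPush e2 b) from by
      rw [pvMerge]; simp [hab, hba]]
    have hbnotl1 : b ∉ a :: t1 := by
      intro hm
      rcases List.mem_cons.1 hm with rfl | hm2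
      · exact absurd hba (lt_irrefl b)
      · exact absurd (lt_of_lt_of_le hba ((List.pairwise_cons.1 hl1).1 b hm2)) (lt_irrefl b)
    have hle2' : ∀ x ∈ pvPush e2 b, ∀ y ∈ t2, x ≤ y := by
      intro x hx y hy
      rcases (mem_pvPush e2 b x).1 hx with hx | rfl
      · exact hle2 x hx y (List.mem_cons_of_mem _ hy)
      · exact (List.pairwise_cons.1 hl2).1 y hy
    obtain ⟨hpair, hm1, hm2⟩ := ih hl1 hl2.tail hle1 hle2' hp1
      (pvPush_pairwise e2 b hp2 (fun z hz => hle2 z hz b (by simp)))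
    refine ⟨hpair, fun x => ?_, fun x => ?_⟩
    · rw [hm1 x]
      have hne : ∀ y ∈ a :: t1, y ≠ b := fun y hy h => hbnotl1 (h ▸ hy)
      constructor
      · rintro (hx | ⟨hx, hnx⟩)
        · exact Or.inl hx
        · refine Or.inr ⟨hx, fun hm => ?_⟩
          rcases List.mem_cons.1 hm with rfl | hm2
          · exact hne x hx rfl
          · exact hnx hm2
      · rintro (hx | ⟨hx, hnx⟩)
        · exact Or.inl hx
        · exact Or.inr ⟨hx, fun hm => hnx (List.mem_cons_of_mem _ hm)⟩
    · rw [hm2 x, mem_pvPush]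
      constructor
      · rintro ((hx | rfl) | ⟨hx, hnx⟩)
        · exact Or.inl hx
        · exact Or.inr ⟨by simp, hbnotl1⟩
        · exact Or.inr ⟨List.mem_cons_of_mem _ hx, hnx⟩
      · rintro (hx | ⟨hx, hnx⟩)
        · exact Or.inl (Or.inl hx)
        · rcases List.mem_cons.1 hx with rfl | hx2
          · exact Or.inl (Or.inr rfl)
          · exact Or.inr ⟨hx2, hnx⟩
  | case5 a t1 b t2 e1 e2 hab hba ih =>
    intro hl1 hl2 hle1 hle2 hp1 hp2
    have hb : b = a := le_antisymm (not_lt.mp hab) (not_lt.mp hba)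
    subst hb
    rw [show pvMerge (b :: t1) (b :: t2) e1 e2
        = pvMerge ((b :: t1).dropWhile (fun x => x == b)) ((b :: t2).dropWhile (fun x => x == b)) e1 e2 from by
      rw [pvMerge]; simp]
    have key : ∀ (l : List String), l.Pairwise (· ≤ ·) → (∀ y ∈ l, b ≤ y) →
        (∀ x, x ∈ l.dropWhile (fun x => x == b) ↔ x ∈ l ∧ x ≠ b) := by
      intro l hl hge x
      have hgt := dropWhile_gt b l hl hge
      constructor
      · intro hx
        exact ⟨List.Sublist.mem hx (List.dropWhile_sublist _), ne_of_gt (hgt x hx)⟩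
      · rintro ⟨hx, hnx⟩
        rw [← List.takeWhile_append_dropWhile (p := fun x => x == b) (l := l)] at hx
        rcases List.mem_append.1 hx with hx | hx
        · exact absurd (by simpa using List.mem_takeWhile_imp hx) hnx
        · exact hx
    have hge1 : ∀ y ∈ b :: t1, b ≤ y := by
      intro y hy
      rcases List.mem_cons.1 hy with rfl | hy2
      · exact le_refl y
      · exact (List.pairwise_cons.1 hl1).1 y hy2
    have hge2 : ∀ y ∈ b :: t2, b ≤ y := by
      intro y hy
      rcases List.mem_cons.1 hy with rfl | hy2
      · exact le_refl y
      · exact (List.pairwise_cons.1 hl2).1 y hy2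
    have hk1 := key (b :: t1) hl1 hge1
    have hk2 := key (b :: t2) hl2 hge2
    have hle1' : ∀ x ∈ e1, ∀ y ∈ (b :: t1).dropWhile (fun x => x == b), x ≤ y :=
      fun x hx y hy => hle1 x hx y ((hk1 y).1 hy).1
    have hle2' : ∀ x ∈ e2, ∀ y ∈ (b :: t2).dropWhile (fun x => x == b), x ≤ y :=
      fun x hx y hy => hle2 x hx y ((hk2 y).1 hy).1
    obtain ⟨hpair, hm1, hm2⟩ := ih (hl1.sublist (List.dropWhile_sublist _))
      (hl2.sublist (List.dropWhile_sublist _)) hle1' hle2' hp1 hp2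
    refine ⟨hpair, fun x => ?_, fun x => ?_⟩
    · rw [hm1 x]
      constructor
      · rintro (hx | ⟨hx, hnx⟩)
        · exact Or.inl hx
        · obtain ⟨hxm, hxne⟩ := (hk1 x).1 hx
          exact Or.inr ⟨hxm, fun hm => hnx ((hk2 x).2 ⟨hm, hxne⟩)⟩
      · rintro (hx | ⟨hx, hnx⟩)
        · exact Or.inl hx
        · have hxne : x ≠ b := fun h => hnx (h ▸ List.mem_cons_self)
          exact Or.inr ⟨(hk1 x).2 ⟨hx, hxne⟩,
            fun hm => hnx ((hk2 x).1 hm).1⟩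
    · rw [hm2 x]
      constructor
      · rintro (hx | ⟨hx, hnx⟩)
        · exact Or.inl hx
        · obtain ⟨hxm, hxne⟩ := (hk2 x).1 hx
          exact Or.inr ⟨hxm, fun hm => hnx ((hk1 x).2 ⟨hm, hxne⟩)⟩
      · rintro (hx | ⟨hx, hnx⟩)
        · exact Or.inl hx
        · have hxne : x ≠ b := fun h => hnx (h ▸ List.mem_cons_self)
          exact Or.inr ⟨(hk2 x).2 ⟨hx, hxne⟩,
            fun hm => hnx ((hk1 x).1 hm).1⟩

-- B's merge output, translated to A's vocabulary and sorted, is A's sorted set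
theorem side_eq (u v e : List String)
    (hmem : ∀ x, x ∈ e ↔ x ∈ u.map PySem.Str.lower ∧ x ∉ v.map PySem.Str.lower)
    (hpw : e.Pairwise (· < ·)) :
    PySem.List.sorted (PySem.Set.ofList ((u.filter (fun item =>
        PySem.Set.contains (PySem.Set.diff (PySem.Set.ofList (u.map PySem.Str.lower))
          (PySem.Set.ofList (v.map PySem.Str.lower))) (PySem.Str.lower item))).map PySem.Str.upper))
      (fun x => x) false
    = PySem.List.sorted (e.map PySem.Str.upper) (fun x => x) false := by
  have hfix : ∀ x ∈ e, PySem.Str.lower x = x := by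
    intro x hx
    obtain ⟨s, -, rfl⟩ := List.mem_map.1 ((hmem x).1 hx).1
    exact lower_lower s
  apply PySem.List.sorted_eq_sorted_of_perm _ _ _ (fun a b h => h)
  rw [List.perm_ext_iff_of_nodup (PySem.Set.nodup_ofList _)
    (List.Nodup.map_on ?_ (hpw.imp ne_of_lt))]
  · intro x
    simp only [PySem.Set.mem_ofList, List.mem_map, List.mem_filter,
      PySem.Set.contains_iff, PySem.Set.mem_diff, PySem.Set.mem_ofList]
    constructor
    · rintro ⟨it, ⟨hit, _, hnv⟩, rfl⟩
      refine ⟨PySem.Str.lower it, (hmem _).2 ⟨List.mem_map_of_mem hit, by simpa [List.mem_map] using hnv⟩, upper_lower it⟩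
    · rintro ⟨k, hk, rfl⟩
      obtain ⟨hku, hkv⟩ := (hmem k).1 hk
      obtain ⟨it, hit, rfl⟩ := List.mem_map.1 hku
      exact ⟨it, ⟨hit, ⟨it, hit, rfl⟩, by simpa [List.mem_map] using hkv⟩, (upper_lower it).symm⟩
  · intro x hx y hy hxy
    have := congrArg PySem.Str.lower hxy
    rwa [lower_upper, lower_upper, hfix x hx, hfix y hy] at this

theorem exclusive_products_eq (inventory1 inventory2 : List String) :
    exclusive_products inventory1 inventory2 = exclusive_products_alt inventory1 inventory2 := by
  rw [exclusive_products, exclusive_products_alt]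
  have hk1p : (PySem.List.sorted (inventory1.map PySem.Str.lower) (fun x => x) false).Pairwise (· ≤ ·) :=
    PySem.List.sorted_pairwise _ _
  have hk2p : (PySem.List.sorted (inventory2.map PySem.Str.lower) (fun x => x) false).Pairwise (· ≤ ·) :=
    PySem.List.sorted_pairwise _ _
  obtain ⟨⟨hp1, hp2⟩, hm1, hm2⟩ := pvMerge_spec
    (PySem.List.sorted (inventory1.map PySem.Str.lower) (fun x => x) false)
    (PySem.List.sorted (inventory2.map PySem.Str.lower) (fun x => x) false)
    [] [] hk1p hk2p (by simp) (by simp) (by simp) (by simp)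
  refine congrArg₂ Prod.mk ?_ ?_
  · refine side_eq inventory1 inventory2 _ (fun x => ?_) hp1
    rw [hm1 x]
    simp [PySem.List.mem_sorted]
  · refine side_eq inventory2 inventory1 _ (fun x => ?_) hp2
    rw [hm2 x]
    simp [PySem.List.mem_sorted]

-- ===== VERDICT (by name: the statement is the Claim_ definition above) =====
theorem exclusive_products_spec : Claim_equal_exclusive_products := by
  intro inventory1 inventory2 _
  exact exclusive_products_eq inventory1 inventory2
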